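-- pv_equiv track=rewrite | github.com/jyshtty/Scaler_DSA_intermidiate | 23_problem_solving_06/homework/first_duplicate_rows_in_binary_string.py | solve
-- ===== SOURCE A (Python) =====
-- def solve(A):
--     s = set()
--     ls = []
--     for i in range(len(A)):
--         decimal = 0
--         for j in range(len(A[i])):
--             decimal += A[i][j] * pow(2, j)
--         if decimal not in s:
--             s.add(decimal)
--         else:
--             ls.append(i + 1)
--     return ls
-- ===== SOURCE B (Python) =====
-- def solve(A):
--     # sort (key, index) pairs, report every element whose sorted predecessor has
--     # an equal key (i.e. every non-first member of a key group), ascending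
--     pairs = sorted((sum(v * 2 ** j for j, v in enumerate(row)), i)
--                    for i, row in enumerate(A))
--     dups = [q[1] + 1 for p, q in zip(pairs, pairs[1:]) if q[0] == p[0]]
--     return sorted(dups)
-- ===== Notes on version B (the rewrite author's own statement) =====
-- stated objective: alternative
-- what changed: A streams over rows keeping a seen-set of decimal keys and appends the 1-based index whenever a key repeats; B instead builds (key, index) pairs, sorts them, collects the index of every pair whose sorted predecessor has an equal key, and returns those indices sorted ascending.
import Mathlib
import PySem

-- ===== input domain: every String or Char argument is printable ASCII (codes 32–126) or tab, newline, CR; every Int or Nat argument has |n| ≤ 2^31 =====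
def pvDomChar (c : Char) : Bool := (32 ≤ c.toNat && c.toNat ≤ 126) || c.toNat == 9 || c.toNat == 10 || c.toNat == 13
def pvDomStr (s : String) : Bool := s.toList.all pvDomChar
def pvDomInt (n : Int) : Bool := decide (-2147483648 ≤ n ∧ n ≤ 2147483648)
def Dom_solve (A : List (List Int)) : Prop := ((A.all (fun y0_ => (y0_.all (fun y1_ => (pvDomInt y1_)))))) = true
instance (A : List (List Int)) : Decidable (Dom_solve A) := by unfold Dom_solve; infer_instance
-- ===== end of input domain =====

-- B replaces A's streaming seen-set with sort-then-adjacent-scan of (key, index) pairs; objective: alternative algorithm.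

-- ===== PORT A =====
def solve (A : List (List Int)) : List Int :=
  ((PySem.List.pyRange 0 (PySem.List.len A)).foldl
    (fun (st : PySem.Set Int × List Int) i =>
      let decimal :=
        (PySem.List.pyRange 0 (PySem.List.len (PySem.List.pyGetD A i []))).foldl
          (fun decimal j => decimal + PySem.List.pyGetD (PySem.List.pyGetD A i []) j 0 * 2 ^ j.toNat) 0
      if !(PySem.Set.contains st.1 decimal) then (PySem.Set.add st.1 decimal, st.2)
      else (st.1, st.2 ++ [i + 1]))
    (PySem.Set.empty, [])).2

-- ===== PORT B =====
def altRowKey (row : List Int) : Int :=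
  ((PySem.List.enumerate row).map (fun p => p.2 * 2 ^ p.1.toNat)).sum

def altPairs (A : List (List Int)) : List (Int × Int) :=
  PySem.List.sorted2 ((PySem.List.enumerate A).map (fun p => (altRowKey p.2, p.1)))
    (fun x => x.1) (fun x => x.2)

def solve_alt (A : List (List Int)) : List Int :=
  let pairs := altPairs A
  let dups := ((pairs.zip (PySem.List.slice pairs (some 1))).filter
      (fun pq => pq.2.1 == pq.1.1)).map (fun pq => pq.2.2 + 1)
  PySem.List.sorted dups (fun x => x)

-- ===== PRECONDITION & SPEC =====
def Spec_solve (A : List (List Int)) (out : List Int) : Prop := out = solve_alt A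
instance (A : List (List Int)) (out : List Int) : Decidable (Spec_solve A out) := by unfold Spec_solve; infer_instance

-- ===== CLAIM (what is proved, stated in full; the proofs are below) =====
def Claim_equal_solve : Prop := ∀ (A : List (List Int)), Dom_solve A → Spec_solve A (solve A)

-- ===== LEMMAS AND PROOFS =====

-- A's inner loop computes the same row key as B's enumerate sum
theorem rowKey_eq (row : List Int) :
    (PySem.List.pyRange 0 (PySem.List.len row)).foldl
      (fun decimal j => decimal + PySem.List.pyGetD row j 0 * 2 ^ j.toNat) 0 = altRowKey row := by
  rw [PySem.List.foldl_add]
  simp [altRowKey, PySem.List.enumerate_eq_map_pyRange row 0, List.map_map]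
  rfl

-- the key of row t of A
def keyAt (A : List (List Int)) (t : Nat) : Int := altRowKey (A.getD t [])

-- the common value: 1-based indices of rows duplicating an earlier row, ascending
def dupSpec (A : List (List Int)) : List Int :=
  ((List.range A.length).filter
    (fun t => decide (keyAt A t ∈ (A.take t).map altRowKey))).map (fun t : Nat => (t : Int) + 1)

-- recursion mirroring A's loop, with the seen set as a plain list
def dupsFrom (seen : List Int) (i0 : Int) : List (List Int) → List Int
  | [] => []
  | r :: rest =>
    if altRowKey r ∈ seen then (i0 + 1) :: dupsFrom seen (i0 + 1) rest
    else dupsFrom (seen ++ [altRowKey r]) (i0 + 1) rest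

theorem loopA (rows : List (List Int)) (i0 : Int) (s : PySem.Set Int) (ls seen : List Int)
    (h : ∀ x, x ∈ s ↔ x ∈ seen) :
    ((PySem.List.enumerate rows i0).foldl
      (fun (st : PySem.Set Int × List Int) p =>
        if !(PySem.Set.contains st.1 (altRowKey p.2)) then (PySem.Set.add st.1 (altRowKey p.2), st.2)
        else (st.1, st.2 ++ [p.1 + 1]))
      (s, ls)).2 = ls ++ dupsFrom seen i0 rows := by
  induction rows generalizing i0 s ls seen with
  | nil => simp [PySem.List.enumerate_nil, dupsFrom]
  | cons r rest ih =>
    rw [PySem.List.enumerate_cons, List.foldl_cons]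
    by_cases hmem : altRowKey r ∈ seen
    · have hc : PySem.Set.contains s (altRowKey r) = true := by
        simpa [PySem.Set.contains, List.contains_iff_mem, h] using hmem
      simp only [hc, Bool.not_true, Bool.false_eq_true, if_false]
      rw [ih (i0 + 1) s (ls ++ [i0 + 1]) seen h]
      simp [dupsFrom, hmem]
    · have hc : PySem.Set.contains s (altRowKey r) = false := by
        simp only [PySem.Set.contains]
        rw [Bool.eq_false_iff]
        intro hcc
        exact hmem ((h _).1 (List.contains_iff_mem.mp hcc))
      simp only [hc, Bool.not_false, if_true]
      rw [ih (i0 + 1) _ ls (seen ++ [altRowKey r]) ?_]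
      · simp [dupsFrom, hmem]
      · intro x
        simp only [PySem.Set.mem_add, List.mem_append, List.mem_singleton, h]

theorem dupsFrom_eq (rows : List (List Int)) (seen : List Int) (i0 : Int) :
    dupsFrom seen i0 rows =
      ((List.range rows.length).filter
        (fun t => decide (altRowKey (rows.getD t []) ∈ seen ∨
                          altRowKey (rows.getD t []) ∈ (rows.take t).map altRowKey))).map
        (fun t : Nat => i0 + (t : Int) + 1) := by
  induction rows generalizing seen i0 with
  | nil => simp [dupsFrom]
  | cons r rest ih =>
    have hf : ((fun t : Nat => i0 + (t : Int) + 1) ∘ Nat.succ)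
        = (fun t : Nat => i0 + 1 + (t : Int) + 1) := by
      funext t; simp [Nat.succ_eq_add_one]; ring
    rw [List.length_cons, List.range_succ_eq_map]
    by_cases hmem : altRowKey r ∈ seen
    · rw [show dupsFrom seen i0 (r :: rest) = (i0 + 1) :: dupsFrom seen (i0 + 1) rest by
        simp [dupsFrom, hmem]]
      rw [List.filter_cons_of_pos (by simpa using hmem), List.map_cons]
      congr 1
      · omega
      rw [ih seen (i0 + 1), List.filter_map, List.map_map, hf]
      congr 1
      apply List.filter_congr
      intro t _
      simp only [Function.comp_apply, Nat.succ_eq_add_one, List.getD_cons_succ,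
        List.take_succ_cons, List.map_cons, List.mem_cons, decide_eq_decide]
      constructor
      · rintro (hs | htk)
        · exact Or.inl hs
        · exact Or.inr (Or.inr htk)
      · rintro (hs | (heq | htk))
        · exact Or.inl hs
        · exact Or.inl (heq ▸ hmem)
        · exact Or.inr htk
    · rw [show dupsFrom seen i0 (r :: rest) = dupsFrom (seen ++ [altRowKey r]) (i0 + 1) rest by
        simp [dupsFrom, hmem]]
      rw [List.filter_cons_of_neg (by simpa using hmem)]
      rw [ih (seen ++ [altRowKey r]) (i0 + 1), List.filter_map, List.map_map, hf]
      congr 1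
      apply List.filter_congr
      intro t _
      simp only [Function.comp_apply, Nat.succ_eq_add_one, List.getD_cons_succ,
        List.take_succ_cons, List.map_cons, List.mem_cons, List.mem_append, decide_eq_decide]
      tauto

theorem solve_eq_dupSpec (A : List (List Int)) : solve A = dupSpec A := by
  unfold solve
  simp only [rowKey_eq]
  rw [show (PySem.List.pyRange 0 (PySem.List.len A)).foldl
      (fun (st : PySem.Set Int × List Int) i =>
        if !(PySem.Set.contains st.1 (altRowKey (PySem.List.pyGetD A i []))) then
          (PySem.Set.add st.1 (altRowKey (PySem.List.pyGetD A i [])), st.2)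
        else (st.1, st.2 ++ [i + 1]))
      (PySem.Set.empty, []) =
    (PySem.List.enumerate A).foldl
      (fun (st : PySem.Set Int × List Int) p =>
        if !(PySem.Set.contains st.1 (altRowKey p.2)) then (PySem.Set.add st.1 (altRowKey p.2), st.2)
        else (st.1, st.2 ++ [p.1 + 1]))
      (PySem.Set.empty, []) by
    rw [PySem.List.enumerate_eq_map_pyRange A [], List.foldl_map]]
  rw [loopA A 0 PySem.Set.empty [] [] (by simp [PySem.Set.empty])]
  rw [dupsFrom_eq]
  unfold dupSpec keyAt
  rw [List.nil_append]
  refine congrArg₂ _ ?_ ?_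
  · funext t; omega
  · apply List.filter_congr
    intro t _
    simp

theorem dupSpec_pairwise (A : List (List Int)) : (dupSpec A).Pairwise (· < ·) := by
  unfold dupSpec
  refine List.Pairwise.map _ ?_ (List.Pairwise.filter _ List.pairwise_lt_range)
  intro a b hab
  omega

theorem dupSpec_nodup (A : List (List Int)) : (dupSpec A).Nodup := by
  exact (dupSpec_pairwise A).imp (fun h => by omega)

theorem mem_take_map (A : List (List Int)) (i : Nat) (v : Int) :
    (∃ r ∈ A.take i, altRowKey r = v) ↔
      ∃ j : Nat, j < i ∧ j < A.length ∧ altRowKey (A.getD j []) = v := by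
  constructor
  · rintro ⟨r, hr, rfl⟩
    rw [List.mem_iff_getElem] at hr
    obtain ⟨j, hj, rfl⟩ := hr
    have hj' : j < i ∧ j < A.length := by
      have := hj; simp [List.length_take] at this; omega
    exact ⟨j, hj'.1, hj'.2, by
      rw [List.getElem_take, List.getD_eq_getElem _ _ hj'.2]⟩
  · rintro ⟨j, hji, hjA, rfl⟩
    refine ⟨A[j], ?_, by rw [List.getD_eq_getElem _ _ hjA]⟩
    rw [List.mem_iff_getElem]
    exact ⟨j, by simp [List.length_take]; omega, by rw [List.getElem_take]⟩

theorem mem_dupSpec (A : List (List Int)) (x : Int) :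
    x ∈ dupSpec A ↔ ∃ i : Nat, i < A.length ∧ x = (i : Int) + 1 ∧
      ∃ j : Nat, j < i ∧ keyAt A j = keyAt A i := by
  unfold dupSpec
  simp only [List.mem_map, List.mem_filter, List.mem_range, decide_eq_true_eq]
  constructor
  · rintro ⟨i, ⟨hi, hc⟩, rfl⟩
    rw [mem_take_map] at hc
    obtain ⟨j, hji, _, hjv⟩ := hc
    exact ⟨i, hi, rfl, j, hji, hjv⟩
  · rintro ⟨i, hi, rfl, j, hji, hjv⟩
    refine ⟨i, ⟨hi, ?_⟩, rfl⟩
    rw [mem_take_map]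
    exact ⟨j, hji, by omega, hjv⟩

-- ===== B side =====

def LexLe (a b : Int × Int) : Prop := a.1 < b.1 ∨ (a.1 = b.1 ∧ a.2 ≤ b.2)

theorem insertBy_pairwise_lex (x : Int × Int) (ys : List (Int × Int))
    (h : ys.Pairwise LexLe) :
    (PySem.List.insertBy
      (fun a b => decide (a.1 < b.1) || (!decide (b.1 < a.1) && decide (a.2 < b.2))) x ys).Pairwise LexLe := by
  induction ys with
  | nil => simp [PySem.List.insertBy]
  | cons y ys ih =>
    rw [List.pairwise_cons] at h
    by_cases hb : (decide (x.1 < y.1) || (!decide (y.1 < x.1) && decide (x.2 < y.2))) = true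
    · rw [show PySem.List.insertBy (fun a b => decide (a.1 < b.1) || (!decide (b.1 < a.1) && decide (a.2 < b.2))) x (y :: ys) = x :: y :: ys by
        simp [PySem.List.insertBy, hb]]
      have hxy : LexLe x y := by
        simp only [Bool.or_eq_true, Bool.and_eq_true, Bool.not_eq_true', decide_eq_true_eq,
          decide_eq_false_iff_not] at hb
        unfold LexLe; omega
      refine List.Pairwise.cons ?_ (List.Pairwise.cons h.1 h.2)
      intro z hz
      cases hz with
      | head => exact hxy
      | tail _ hz =>
        have hyz := h.1 z hz
        unfold LexLe at *; omega
    · rw [show PySem.List.insertBy (fun a b => decide (a.1 < b.1) || (!decide (b.1 < a.1) && decide (a.2 < b.2))) x (y :: ys) =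
          y :: PySem.List.insertBy (fun a b => decide (a.1 < b.1) || (!decide (b.1 < a.1) && decide (a.2 < b.2))) x ys by
        simp [PySem.List.insertBy, hb]]
      have hyx : LexLe y x := by
        simp only [Bool.or_eq_true, Bool.and_eq_true, Bool.not_eq_true', decide_eq_true_eq,
          decide_eq_false_iff_not] at hb
        unfold LexLe; omega
      refine List.Pairwise.cons ?_ (ih h.2)
      intro z hz
      rw [PySem.List.mem_insertBy] at hz
      rcases hz with rfl | hz
      · exact hyx
      · exact h.1 z hz

theorem foldl_insertBy_pairwise (l : List (Int × Int)) (acc : List (Int × Int))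
    (h : acc.Pairwise LexLe) :
    (l.foldl (fun acc x => PySem.List.insertBy
      (fun a b => decide (a.1 < b.1) || (!decide (b.1 < a.1) && decide (a.2 < b.2))) x acc) acc).Pairwise LexLe := by
  induction l generalizing acc with
  | nil => simpa
  | cons p l ih => exact ih _ (insertBy_pairwise_lex p acc h)

theorem altPairs_pairwise (A : List (List Int)) : (altPairs A).Pairwise LexLe := by
  unfold altPairs PySem.List.sorted2
  simpa using foldl_insertBy_pairwise _ [] (by simp)

theorem altPairs_perm (A : List (List Int)) :
    (altPairs A).Perm ((PySem.List.enumerate A).map (fun p => (altRowKey p.2, p.1))) :=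
  PySem.List.sorted2_perm _ _ _ _

theorem mem_altPairs (A : List (List Int)) (a : Int × Int) :
    a ∈ altPairs A ↔ ∃ t : Nat, t < A.length ∧ a = (keyAt A t, (t : Int)) := by
  rw [(altPairs_perm A).mem_iff]
  simp only [List.mem_map, PySem.List.mem_enumerate_iff]
  constructor
  · rintro ⟨p, ⟨k, hk, rfl⟩, rfl⟩
    exact ⟨k, hk, by simp [keyAt, List.getElem?_eq_getElem hk]⟩
  · rintro ⟨t, ht, rfl⟩
    exact ⟨((t : Int), A[t]), ⟨t, ht, by simp⟩, by simp [keyAt, List.getElem?_eq_getElem ht]⟩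

theorem altPairs_snd_nodup (A : List (List Int)) : ((altPairs A).map (·.2)).Nodup := by
  have hp : ((altPairs A).map (·.2)).Perm
      (((PySem.List.enumerate A).map (fun p => (altRowKey p.2, p.1))).map (·.2)) :=
    (altPairs_perm A).map _
  rw [hp.nodup_iff, List.map_map]
  have : ((fun x : Int × Int => x.2) ∘ (fun p : Int × List Int => (altRowKey p.2, p.1)))
      = fun p : Int × List Int => p.1 := rfl
  rw [this, PySem.List.map_fst_enumerate]
  exact PySem.List.nodup_pyRange_one _ _

theorem altPairs_pairwise_lt (A : List (List Int)) :
    (altPairs A).Pairwise (fun a b => a.1 < b.1 ∨ (a.1 = b.1 ∧ a.2 < b.2)) := by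
  have h1 := altPairs_pairwise A
  have h2 : (altPairs A).Pairwise (fun a b => a.2 ≠ b.2) := by
    have := altPairs_snd_nodup A
    rw [List.Nodup, List.pairwise_map] at this
    exact this
  refine (h1.and h2).imp ?_
  rintro a b ⟨hle, hne⟩
  unfold LexLe at hle
  rcases hle with h | ⟨he, h⟩
  · exact Or.inl h
  · exact Or.inr ⟨he, lt_of_le_of_ne h hne⟩

theorem altPairs_nodup (A : List (List Int)) : (altPairs A).Nodup :=
  (altPairs_pairwise_lt A).imp (fun h => by
    rintro rfl
    rcases h with h | ⟨_, h⟩ <;> omega)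

theorem altPairs_length (A : List (List Int)) : (altPairs A).length = A.length := by
  rw [(altPairs_perm A).length_eq, List.length_map, PySem.List.length_enumerate]

-- B's unsorted duplicate list
def dupsB (A : List (List Int)) : List Int :=
  (((altPairs A).zip (PySem.List.slice (altPairs A) (some 1))).filter
      (fun pq => pq.2.1 == pq.1.1)).map (fun pq => pq.2.2 + 1)

theorem slice_one_eq_tail {α : Type} (l : List α) :
    PySem.List.slice l (some 1) = l.tail := by
  rw [PySem.List.slice_from l (by norm_num)]
  simp

theorem mem_zip_tail {α : Type} (l : List α) (p : α × α) :
    p ∈ l.zip l.tail ↔ ∃ t : Nat, ∃ _ : t + 1 < l.length, p = (l[t], l[t+1]) := by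
  rw [List.mem_iff_getElem]
  constructor
  · rintro ⟨i, hi, rfl⟩
    have hlen : i + 1 < l.length := by
      simp [List.length_zip, List.length_tail] at hi; omega
    refine ⟨i, hlen, ?_⟩
    rw [List.getElem_zip]
    simp [List.getElem_tail]
  · rintro ⟨t, ht, rfl⟩
    refine ⟨t, by simp [List.length_zip, List.length_tail]; omega, ?_⟩
    rw [List.getElem_zip]
    simp [List.getElem_tail]

theorem mem_dupsB (A : List (List Int)) (x : Int) :
    x ∈ dupsB A ↔ ∃ t : Nat, ∃ _ : t + 1 < (altPairs A).length,
      (altPairs A)[t+1].1 = (altPairs A)[t].1 ∧ x = (altPairs A)[t+1].2 + 1 := by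
  unfold dupsB
  rw [slice_one_eq_tail]
  simp only [List.mem_map, List.mem_filter, beq_iff_eq]
  constructor
  · rintro ⟨pq, ⟨hz, he⟩, rfl⟩
    rw [mem_zip_tail] at hz
    obtain ⟨t, ht, rfl⟩ := hz
    exact ⟨t, ht, he, rfl⟩
  · rintro ⟨t, ht, he, rfl⟩
    exact ⟨((altPairs A)[t], (altPairs A)[t+1]), ⟨(mem_zip_tail _ _).mpr ⟨t, ht, rfl⟩, he⟩, rfl⟩

theorem dupsB_nodup (A : List (List Int)) : (dupsB A).Nodup := by
  unfold dupsB
  rw [slice_one_eq_tail]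
  have hzl : ((altPairs A).zip (altPairs A).tail).map (·.2) = (altPairs A).tail :=
    List.map_snd_zip (by simp [List.length_tail])
  have hsub : ((((altPairs A).zip (altPairs A).tail).filter (fun pq => pq.2.1 == pq.1.1)).map (·.2)).Sublist
      (altPairs A).tail := by
    have h2 := List.Sublist.map (fun pq : (Int × Int) × (Int × Int) => pq.2)
      (List.filter_sublist (p := fun pq => pq.2.1 == pq.1.1)
        (l := (altPairs A).zip (altPairs A).tail))
    rw [hzl] at h2
    exact h2
  have hnd : ((((altPairs A).zip (altPairs A).tail).filter (fun pq => pq.2.1 == pq.1.1)).map (·.2)).Nodup :=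
    ((altPairs_nodup A).sublist (hsub.trans (List.tail_sublist _)))
  have : (fun pq : (Int × Int) × (Int × Int) => pq.2.2 + 1)
      = (fun b : Int × Int => b.2 + 1) ∘ (fun pq : (Int × Int) × (Int × Int) => pq.2) := rfl
  rw [this, ← List.map_map]
  refine List.Nodup.map_on ?_ hnd
  intro b hb b' hb' he
  have hmb : b ∈ altPairs A := (hsub.trans (List.tail_sublist _)).mem hb
  have hmb' : b' ∈ altPairs A := (hsub.trans (List.tail_sublist _)).mem hb'
  obtain ⟨t, _, rfl⟩ := (mem_altPairs A b).mp hmb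
  obtain ⟨t', _, rfl⟩ := (mem_altPairs A b').mp hmb'
  simp only at he
  have : t = t' := by omega
  subst this; rfl

theorem mem_dupsB_iff_dupSpec (A : List (List Int)) (x : Int) :
    x ∈ dupsB A ↔ x ∈ dupSpec A := by
  rw [mem_dupsB, mem_dupSpec]
  have hlen := altPairs_length A
  have hlt := List.pairwise_iff_getElem.mp (altPairs_pairwise_lt A)
  have hle := List.pairwise_iff_getElem.mp (altPairs_pairwise A)
  constructor
  · rintro ⟨t, ht, he, rfl⟩
    obtain ⟨i, hi, hbi⟩ := (mem_altPairs A ((altPairs A)[t+1])).mp (List.getElem_mem ht)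
    obtain ⟨j, hj, haj⟩ := (mem_altPairs A ((altPairs A)[t])).mp (List.getElem_mem (by omega))
    have hb1 := congrArg Prod.fst hbi
    have hb2 := congrArg Prod.snd hbi
    have ha1 := congrArg Prod.fst haj
    have ha2 := congrArg Prod.snd haj
    simp only at hb1 hb2 ha1 ha2
    have hstep := hlt t (t+1) (by omega) ht (by omega)
    rw [hb1, hb2, ha1, ha2] at hstep
    have hji : j < i := by
      rcases hstep with h | ⟨_, h⟩
      · exfalso; rw [hb1, ha1] at he; omega
      · exact_mod_cast h
    refine ⟨i, hi, by rw [hb2], j, hji, ?_⟩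
    rw [hb1, ha1] at he
    exact he.symm
  · rintro ⟨i, hi, rfl, j, hji, hjv⟩
    have hbmem : ((keyAt A i, (i : Int)) : Int × Int) ∈ altPairs A :=
      (mem_altPairs A _).mpr ⟨i, hi, rfl⟩
    have hamem : ((keyAt A j, (j : Int)) : Int × Int) ∈ altPairs A :=
      (mem_altPairs A _).mpr ⟨j, by omega, rfl⟩
    obtain ⟨t, ht, hbt⟩ := List.mem_iff_getElem.mp hbmem
    obtain ⟨s, hs, has⟩ := List.mem_iff_getElem.mp hamem
    have hst : s < t := by
      rcases Nat.lt_trichotomy s t with h | h | h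
      · exact h
      · exfalso
        subst h
        rw [hbt] at has
        have := congrArg Prod.snd has
        simp only at this
        omega
      · exfalso
        have h2 := hlt t s ht hs h
        rw [hbt, has] at h2
        simp only [hjv] at h2
        rcases h2 with h2 | ⟨_, h2⟩
        · omega
        · have : (i : Int) < (j : Int) := h2
          omega
    obtain ⟨u, rfl⟩ : ∃ u, t = u + 1 := ⟨t - 1, by omega⟩
    have h2 : (altPairs A)[u].1 ≤ keyAt A i := by
      have h4 := hle u (u+1) (by omega) ht (by omega)
      rw [hbt] at h4
      rcases h4 with h4 | ⟨h4, _⟩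
      · exact le_of_lt h4
      · exact le_of_eq h4
    have h3 : keyAt A i ≤ (altPairs A)[u].1 := by
      rcases Nat.eq_or_lt_of_le (by omega : s ≤ u) with h | h
      · subst h
        rw [has, ← hjv]
      · have h4 := hle s u hs (by omega) h
        rw [has] at h4
        rcases h4 with h4 | ⟨h4, _⟩
        · rw [← hjv]; exact le_of_lt h4
        · rw [← hjv]; exact le_of_eq h4
    refine ⟨u, ht, ?_, ?_⟩
    · rw [hbt]; omega
    · rw [hbt]

theorem solve_alt_eq_dupSpec (A : List (List Int)) : solve_alt A = dupSpec A := by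
  have h1 : solve_alt A = PySem.List.sorted (dupsB A) (fun x => x) := rfl
  rw [h1]
  apply PySem.List.sorted_eq_of_perm_of_pairwise_lt
  · rw [List.perm_ext_iff_of_nodup (dupSpec_nodup A) (dupsB_nodup A)]
    intro a
    rw [mem_dupsB_iff_dupSpec]
  · exact dupSpec_pairwise A

-- ===== VERDICT (by name: the statement is the Claim_ definition above) =====
theorem solve_spec : Claim_equal_solve := by
  intro A _
  unfold Spec_solve
  rw [solve_eq_dupSpec, solve_alt_eq_dupSpec]
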